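-- pv_equiv track=rewrite | github.com/fpddmw/https---github.com-fpddmw-eco-concil-runtime | eco-concil-runtime/src/eco_council_runtime/kernel/registry.py | parse_required_inputs
-- ===== SOURCE A (Python) =====
-- def section_lines(markdown_text: str, heading: str) -> list[str]:
--     lines = markdown_text.splitlines()
--     target = f"## {heading}"
--     in_section = False
--     collected: list[str] = []
--     for line in lines:
--         stripped = line.strip()
--         if stripped == target:
--             in_section = True
--             continue
--         if in_section and stripped.startswith("## "):
--             break
--         if in_section:
--             collected.append(line)
--     return collected
--
-- def parse_required_inputs(markdown_text: str) -> dict[str, list[str]]: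
--     required: list[str] = []
--     optional: list[str] = []
--     target = required
--     for line in section_lines(markdown_text, "Required Input"):
--         stripped = line.strip()
--         if not stripped.startswith("-"):
--             continue
--         value = stripped[1:].strip()
--         if value.lower().startswith("optional"):
--             target = optional
--             continue
--         target.append(value.strip("`").rstrip(":"))
--     return {"required": required, "optional": optional}
-- ===== SOURCE B (Python) =====
-- def parse_required_inputs(markdown_text: str) -> dict[str, list[str]]:
--     # Single pass over the lines: a small state machine (outside/inside the
--     # "## Required Input" section, required/optional target flag), with no
--     # helper call and no intermediate collected list.
--     required: list[str] = []
--     optional: list[str] = []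
--     inside = False
--     use_optional = False
--     for line in markdown_text.splitlines():
--         stripped = line.strip()
--         if stripped == "## Required Input":
--             inside = True
--             continue
--         if not inside:
--             continue
--         if stripped.startswith("## "):
--             break
--         if not stripped.startswith("-"):
--             continue
--         value = stripped[1:].strip()
--         if value.lower().startswith("optional"):
--             use_optional = True
--             continue
--         item = value.strip("`").rstrip(":")
--         if use_optional:
--             optional.append(item)
--         else:
--             required.append(item)
--     return {"required": required, "optional": optional}
-- ===== Notes on version B (the rewrite author's own statement) =====
-- stated objective: simpler
-- what changed: Replaces the two-phase structure (section_lines collects the section into a list, then a second loop parses it) by one fused pass over splitlines() driven by an inside/outside state machine with an early break, so no helper and no intermediate list exist.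
import Mathlib
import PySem

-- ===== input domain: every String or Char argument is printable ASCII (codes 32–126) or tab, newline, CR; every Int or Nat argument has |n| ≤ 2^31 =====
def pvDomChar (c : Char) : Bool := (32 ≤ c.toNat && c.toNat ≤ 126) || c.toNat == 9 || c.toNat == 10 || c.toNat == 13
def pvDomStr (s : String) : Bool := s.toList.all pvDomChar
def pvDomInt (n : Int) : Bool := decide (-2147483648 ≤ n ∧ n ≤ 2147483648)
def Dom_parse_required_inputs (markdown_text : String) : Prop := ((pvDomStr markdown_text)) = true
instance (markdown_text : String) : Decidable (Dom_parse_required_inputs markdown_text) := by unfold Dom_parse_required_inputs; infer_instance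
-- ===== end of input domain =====

-- B fuses A's two phases (section_lines collecting a list, then a parsing loop) into one
-- state-machine pass over the lines with no intermediate list; objective: simpler.

-- hand port of Python's s.rstrip(":") (drop trailing ':' characters); exact, used by both ports
def pvRstripColon (s : String) : String :=
  String.ofList ((s.toList.reverse.dropWhile (fun c => c == ':')).reverse)

-- ===== PORT A =====
-- the for-loop of section_lines, with its break and the 'collected' accumulator
def sectionLinesGo (target : String) : List String → Bool → List String → List String
  | [], _, collected => collected
  | line :: rest, in_section, collected =>
    let stripped := PySem.Str.strip line
    if stripped == target then sectionLinesGo target rest true collected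
    else if in_section && PySem.Str.startswith stripped "## " then collected
    else if in_section then sectionLinesGo target rest in_section (collected ++ [line])
    else sectionLinesGo target rest in_section collected

def section_lines (markdown_text : String) (heading : String) : List String :=
  sectionLinesGo ("## " ++ heading) (PySem.Str.splitlines markdown_text) false []

-- one iteration of parse_required_inputs' for-loop; state = (required, optional, target-is-optional)
def parseStep (st : List String × List String × Bool) (line : String) :
    List String × List String × Bool :=
  let stripped := PySem.Str.strip line
  if !(PySem.Str.startswith stripped "-") then st
  else
    let value := PySem.Str.strip (PySem.Str.slice stripped (some 1) none)
    if PySem.Str.startswith (PySem.Str.lower value) "optional" then (st.1, st.2.1, true)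
    else
      let item := pvRstripColon (PySem.Str.stripChars value "`")
      if st.2.2 then (st.1, st.2.1 ++ [item], st.2.2)
      else (st.1 ++ [item], st.2.1, st.2.2)

def parse_required_inputs (markdown_text : String) : List (String × List String) :=
  let st := (section_lines markdown_text "Required Input").foldl parseStep ([], [], false)
  [("required", st.1), ("optional", st.2.1)]

-- ===== PORT B =====
-- the single fused loop of Source B: state = inside-section flag, use_optional flag, the two lists
def altGo : List String → Bool → Bool → List String → List String → List String × List String
  | [], _, _, required, optional => (required, optional)
  | line :: rest, inside, use_optional, required, optional =>
    let stripped := PySem.Str.strip line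
    if stripped == "## Required Input" then altGo rest true use_optional required optional
    else if !inside then altGo rest inside use_optional required optional
    else if PySem.Str.startswith stripped "## " then (required, optional)
    else if !(PySem.Str.startswith stripped "-") then altGo rest inside use_optional required optional
    else
      let value := PySem.Str.strip (PySem.Str.slice stripped (some 1) none)
      if PySem.Str.startswith (PySem.Str.lower value) "optional" then
        altGo rest inside true required optional
      else
        let item := pvRstripColon (PySem.Str.stripChars value "`")
        if use_optional then altGo rest inside use_optional required (optional ++ [item])
        else altGo rest inside use_optional (required ++ [item]) optional

def parse_required_inputs_alt (markdown_text : String) : List (String × List String) :=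
  let p := altGo (PySem.Str.splitlines markdown_text) false false [] []
  [("required", p.1), ("optional", p.2)]

-- ===== PRECONDITION & SPEC =====
def Spec_parse_required_inputs (markdown_text : String) (out : List (String × List String)) : Prop := out = parse_required_inputs_alt markdown_text
instance (markdown_text : String) (out : List (String × List String)) : Decidable (Spec_parse_required_inputs markdown_text out) := by unfold Spec_parse_required_inputs; infer_instance

-- ===== CLAIM (what is proved, stated in full; the proofs are below) =====
def Claim_equal_parse_required_inputs : Prop := ∀ (markdown_text : String), Dom_parse_required_inputs markdown_text → Spec_parse_required_inputs markdown_text (parse_required_inputs markdown_text)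

-- ===== LEMMAS AND PROOFS =====

-- the 'collected' accumulator only prepends
theorem sectionLinesGo_acc (target : String) (lines : List String) (b : Bool) (acc : List String) :
    sectionLinesGo target lines b acc = acc ++ sectionLinesGo target lines b [] := by
  induction lines generalizing b acc with
  | nil => simp [sectionLinesGo]
  | cons line rest ih =>
    simp only [sectionLinesGo]
    split_ifs with h1 h2 h3
    · exact ih _ _
    · simp
    · simp only [List.nil_append]
      rw [ih _ (acc ++ [line]), ih _ [line]]; simp
    · exact ih _ _

-- fusion: folding parseStep over what sectionLinesGo collects is B's single loop
theorem fusion (lines : List String) (b : Bool) (req opt : List String) (t : Bool) :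
    (((sectionLinesGo "## Required Input" lines b []).foldl parseStep (req, opt, t)).1,
      ((sectionLinesGo "## Required Input" lines b []).foldl parseStep (req, opt, t)).2.1)
      = altGo lines b t req opt := by
  induction lines generalizing b req opt t with
  | nil => simp [sectionLinesGo, altGo]
  | cons line rest ih =>
    by_cases h1 : (PySem.Str.strip line == "## Required Input") = true
    · simp only [sectionLinesGo, altGo, h1, if_true]
      exact ih _ _ _ _
    · cases b with
      | true =>
        by_cases hs : PySem.Str.startswith (PySem.Str.strip line) "## " = true
        · have hs' : PySem.Chars.startswith (PySem.Chars.strip line.toList) ['#', '#', ' '] = true := by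
            simpa using hs
          simp [sectionLinesGo, altGo, h1, hs']
        · -- collect the line, apply one parseStep
          simp only [sectionLinesGo, altGo, h1, hs, Bool.true_and, if_false,
            Bool.not_true, Bool.false_eq_true, if_true, List.nil_append]
          rw [sectionLinesGo_acc _ rest true [line], List.singleton_append, List.foldl_cons]
          rw [ih]
          simp only [parseStep]
          split_ifs <;> simp_all
      | false =>
        simp only [sectionLinesGo, altGo, h1, Bool.false_and, if_false,
          Bool.not_false, if_true, Bool.false_eq_true]
        rw [ih]

-- ===== VERDICT (by name: the statement is the Claim_ definition above) =====
theorem parse_required_inputs_spec : Claim_equal_parse_required_inputs := by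
  intro md _
  unfold Spec_parse_required_inputs parse_required_inputs parse_required_inputs_alt section_lines
  have h := fusion (PySem.Str.splitlines md) false [] [] false
  have h1 := congrArg Prod.fst h
  have h2 := congrArg Prod.snd h
  simp only at h1 h2
  simp only [show ("## " ++ "Required Input" : String) = "## Required Input" from rfl, h1, h2]
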